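-- pv_equiv track=rewrite | github.com/ckoons/BubbleSpacetimeTheory | play/toy_319_deep_extension_width.py | _dpll_rec
-- ===== SOURCE A (Python) =====
-- def _dpll_rec(clauses, n_total, assign, depth_left):
--     assign = dict(assign)
--     changed = True
--     while changed:
--         changed = False
--         for clause in clauses:
--             unresolved = []
--             sat = False
--             for lit in clause:
--                 v = abs(lit)
--                 if v in assign:
--                     if (lit > 0) == assign[v]:
--                         sat = True
--                         break
--                 else:
--                     unresolved.append(lit)
--             if sat:
--                 continue
--             if len(unresolved) == 0:
--                 return True
--             if len(unresolved) == 1: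
--                 lit = unresolved[0]
--                 v = abs(lit)
--                 val = (lit > 0)
--                 if v in assign:
--                     if assign[v] != val:
--                         return True
--                 else:
--                     assign[v] = val
--                     changed = True
--
--     if depth_left <= 0:
--         return False
--
--     for v in range(1, n_total + 1):
--         if v not in assign:
--             a1 = dict(assign); a1[v] = True
--             a2 = dict(assign); a2[v] = False
--             return _dpll_rec(clauses, n_total, a1, depth_left - 1) and \
--                    _dpll_rec(clauses, n_total, a2, depth_left - 1)
--
--     return False
-- ===== SOURCE B (Python) =====
-- def _clause_rem(clause, assign):
--     """None if the clause is satisfied, else its unassigned literals (in order)."""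
--     if any((lit > 0) == assign.get(abs(lit)) for lit in clause):
--         return None
--     return [lit for lit in clause if abs(lit) not in assign]
--
--
-- def _unit_pass(clauses, assign):
--     """One left-to-right pass; mutates assign. None = the original's
--     return-True cases (a fully falsified clause); else the changed flag."""
--     changed = False
--     for clause in clauses:
--         rem = _clause_rem(clause, assign)
--         if rem is None:
--             continue
--         if not rem:
--             return None
--         if len(rem) == 1:
--             assign[abs(rem[0])] = rem[0] > 0
--             changed = True
--     return changed
--
--
-- def _dpll_rec(clauses, n_total, assign, depth_left):
--     # Iterative DFS over an explicit stack of (assignment, depth) frames; the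
--     # original's nested `and` makes its result the conjunction over all reachable
--     # leaves, so returning False at the first failing leaf is equivalent.
--     stack = [(dict(assign), depth_left)]
--     while stack:
--         cur, depth = stack.pop()
--         while True:
--             r = _unit_pass(clauses, cur)
--             if r is None or not r:
--                 break
--         if r is None:
--             continue  # satisfied/conflict leaf: original returns True here
--         if depth <= 0:
--             return False
--         v = next((u for u in range(1, n_total + 1) if u not in cur), None)
--         if v is None:
--             return False
--         stack.append(({**cur, v: False}, depth - 1))
--         stack.append(({**cur, v: True}, depth - 1))
--     return True
-- ===== Notes on version B (the rewrite author's own statement) =====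
-- stated objective: alternative
-- what changed: B replaces A's recursion (implicit call-stack conjunction of the two branch results) by an iterative DFS over an explicit stack of (assignment, depth) frames with early exit on the first failing leaf, and re-decomposes unit propagation into a declarative per-clause classifier (short-circuiting any + comprehension instead of a break-scan) driven by a fold-style pass helper; valid because A's result is the conjunction over all reachable leaves.
import Mathlib
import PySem

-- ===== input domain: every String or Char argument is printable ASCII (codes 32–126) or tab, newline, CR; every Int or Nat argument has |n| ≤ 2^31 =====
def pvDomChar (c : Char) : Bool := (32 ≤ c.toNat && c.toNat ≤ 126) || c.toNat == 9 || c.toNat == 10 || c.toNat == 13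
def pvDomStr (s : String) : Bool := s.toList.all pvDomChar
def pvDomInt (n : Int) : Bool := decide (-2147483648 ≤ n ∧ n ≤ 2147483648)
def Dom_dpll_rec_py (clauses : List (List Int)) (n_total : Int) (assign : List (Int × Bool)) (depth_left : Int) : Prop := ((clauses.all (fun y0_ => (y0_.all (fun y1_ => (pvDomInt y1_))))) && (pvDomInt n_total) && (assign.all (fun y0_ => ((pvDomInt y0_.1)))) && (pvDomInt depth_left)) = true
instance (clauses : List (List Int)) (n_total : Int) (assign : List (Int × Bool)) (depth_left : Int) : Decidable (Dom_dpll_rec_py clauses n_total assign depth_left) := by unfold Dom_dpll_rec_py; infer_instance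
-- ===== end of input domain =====

-- B rewrites A's recursive search as an iterative DFS over an explicit stack and
-- re-decomposes unit propagation declaratively (any/filter classifier + fold pass);
-- same results, same cost (objective: alternative decomposition).

-- ===== PORT A =====
-- `abs(lit)` : Python abs on Int
def pvAbs (n : Int) : Int := if n < 0 then -n else n

-- inner `for lit in clause` loop: (sat, unresolved). When a satisfying literal is
-- found Python breaks out; the partial `unresolved` list is never used then, so the
-- port returns [] in that case.
def pvScanClause (assign : PySem.Dict Int Bool) : List Int → Bool × List Int
  | [] => (false, [])
  | lit :: rest =>
    match assign.get? (pvAbs lit) with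
    | some b => if (decide (lit > 0)) == b then (true, []) else pvScanClause assign rest
    | none =>
      let r := pvScanClause assign rest
      (r.1, lit :: r.2)

-- one `for clause in clauses` pass of the while-loop body; `none` = the Python
-- `return True` cases (empty unresolved clause, or contradictory unit clause)
def pvPass (assign : PySem.Dict Int Bool) (changed : Bool) :
    List (List Int) → Option (Bool × PySem.Dict Int Bool)
  | [] => some (changed, assign)
  | c :: cs =>
    let r := pvScanClause assign c
    if r.1 then pvPass assign changed cs
    else
      match r.2 with
      | [] => none
      | [lit] =>
        let v := pvAbs lit
        let val := decide (lit > 0)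
        match assign.get? v with
        | some b => if b != val then none else pvPass assign changed cs
        | none => pvPass (assign.insert v val) true cs
      | _ => pvPass assign changed cs

-- the `while changed` loop, fuel-bounded; each repeated pass has inserted at least
-- one new key drawn from the literals of `clauses`, so fuel = total literal count + 1
-- always reaches the fixed point (the fuel-0 branch is unreachable at that fuel)
def pvPropagate (clauses : List (List Int)) (assign : PySem.Dict Int Bool) :
    Nat → Option (PySem.Dict Int Bool)
  | 0 => some assign
  | fuel + 1 =>
    match pvPass assign false clauses with
    | none => none
    | some (changed, a) => if changed then pvPropagate clauses a fuel else some a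

def pvFuel (clauses : List (List Int)) : Nat := (clauses.map List.length).sum + 1

-- `for v in range(1, n_total + 1): if v not in assign: …` — first unassigned variable
def pvFirstUnassigned (assign : PySem.Dict Int Bool) (v n_total : Int) : Option Int :=
  if h : v < n_total + 1 then
    if assign.contains v then pvFirstUnassigned assign (v + 1) n_total else some v
  else none
termination_by (n_total + 1 - v).toNat
decreasing_by omega

-- A's recursion, on the dict produced by `dict(assign)`
def pvGoA (clauses : List (List Int)) (n_total : Int)
    (assign : PySem.Dict Int Bool) (depth_left : Int) : Bool :=
  match pvPropagate clauses assign (pvFuel clauses) with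
  | none => true
  | some a =>
    if depth_left ≤ 0 then false
    else
      match pvFirstUnassigned a 1 n_total with
      | none => false
      | some v =>
          pvGoA clauses n_total (a.insert v true) (depth_left - 1) &&
          pvGoA clauses n_total (a.insert v false) (depth_left - 1)
termination_by depth_left.toNat
decreasing_by all_goals omega

def dpll_rec_py (clauses : List (List Int)) (n_total : Int) (assign : List (Int × Bool)) (depth_left : Int) : Bool :=
  pvGoA clauses n_total (PySem.Dict.ofList assign) depth_left

-- ===== PORT B =====
-- `_clause_rem`: none = clause satisfied (`any(...)`), else its unassigned literals
-- (the comprehension's filter)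
def altClauseRem (assign : PySem.Dict Int Bool) (clause : List Int) : Option (List Int) :=
  if clause.any (fun lit =>
      assign.get? (if lit < 0 then -lit else lit) == some (decide (lit > 0))) then
    none
  else
    some (clause.filter (fun lit => !(assign.contains (if lit < 0 then -lit else lit))))

-- body of `_unit_pass`'s for-loop as a fold step over Option state
-- (none = the early `return None`, absorbed for the remaining clauses)
def altStep (acc : Option (Bool × PySem.Dict Int Bool)) (clause : List Int) :
    Option (Bool × PySem.Dict Int Bool) :=
  match acc with
  | none => none
  | some (changed, a) =>
    match altClauseRem a clause with
    | none => some (changed, a)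
    | some [] => none
    | some [lit] => some (true, a.insert (if lit < 0 then -lit else lit) (decide (lit > 0)))
    | some _ => some (changed, a)

def altPass (clauses : List (List Int)) (a : PySem.Dict Int Bool) :
    Option (Bool × PySem.Dict Int Bool) :=
  clauses.foldl altStep (some (false, a))

-- Source B's inner `while True` propagation loop, fuel-bounded (fuel = total literal
-- count + 1 suffices: every continuing iteration has assigned a new clause variable)
def altFuel (clauses : List (List Int)) : Nat :=
  clauses.foldl (fun s c => s + c.length) 0 + 1

def altPropagate (clauses : List (List Int)) :
    Nat → PySem.Dict Int Bool → Option (PySem.Dict Int Bool)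
  | 0, a => some a
  | fuel + 1, a =>
    match altPass clauses a with
    | none => none
    | some (true, a') => altPropagate clauses fuel a'
    | some (false, a') => some a'

-- `next((u for u in range(1, n_total+1) if u not in cur), None)`
def altFind (cur : PySem.Dict Int Bool) (n_total : Int) : Option Int :=
  (PySem.List.pyRange 1 (n_total + 1) 1).find? (fun u => !(cur.contains u))

-- the `while stack:` DFS; head of the list = top of the stack, so pushing the False
-- child then the True child pops the True child first, as Source B's pop() order
def altLoop (clauses : List (List Int)) (n_total : Int) :
    List (PySem.Dict Int Bool × Int) → Bool
  | [] => true
  | (cur, depth) :: rest =>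
    match altPropagate clauses (altFuel clauses) cur with
    | none => altLoop clauses n_total rest
    | some a =>
      if _h : depth ≤ 0 then false
      else
        match altFind a n_total with
        | none => false
        | some v =>
            altLoop clauses n_total
              ((a.insert v true, depth - 1) :: (a.insert v false, depth - 1) :: rest)
termination_by st => (st.map (fun f => 3 ^ f.2.toNat)).sum
decreasing_by
  · simp only [List.map_cons, List.sum_cons]
    have : 0 < 3 ^ depth.toNat := Nat.pow_pos (by omega)
    omega
  · simp only [List.map_cons, List.sum_cons]
    have hd : depth.toNat = (depth - 1).toNat + 1 := by omega
    have h3 : (3:Nat) ^ depth.toNat = 3 * 3 ^ (depth - 1).toNat := by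
      rw [hd, pow_succ]; ring
    have : 0 < 3 ^ (depth - 1).toNat := Nat.pow_pos (by omega)
    omega

def dpll_rec_py_alt (clauses : List (List Int)) (n_total : Int) (assign : List (Int × Bool)) (depth_left : Int) : Bool :=
  altLoop clauses n_total [(PySem.Dict.ofList assign, depth_left)]

-- ===== PRECONDITION & SPEC =====
def Spec_dpll_rec_py (clauses : List (List Int)) (n_total : Int) (assign : List (Int × Bool)) (depth_left : Int) (out : Bool) : Prop := out = dpll_rec_py_alt clauses n_total assign depth_left
instance (clauses : List (List Int)) (n_total : Int) (assign : List (Int × Bool)) (depth_left : Int) (out : Bool) : Decidable (Spec_dpll_rec_py clauses n_total assign depth_left out) := by unfold Spec_dpll_rec_py; infer_instance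

-- ===== CLAIM (what is proved, stated in full; the proofs are below) =====
def Claim_equal_dpll_rec_py : Prop := ∀ (clauses : List (List Int)) (n_total : Int) (assign : List (Int × Bool)) (depth_left : Int), Dom_dpll_rec_py clauses n_total assign depth_left → Spec_dpll_rec_py clauses n_total assign depth_left (dpll_rec_py clauses n_total assign depth_left)

-- ===== LEMMAS AND PROOFS =====
-- A's break-scan returns `true` exactly where B's `any` classifier says satisfied
theorem scan_fst (a : PySem.Dict Int Bool) (c : List Int) :
    (pvScanClause a c).1
      = c.any (fun lit => a.get? (if lit < 0 then -lit else lit) == some (decide (lit > 0))) := by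
  induction c with
  | nil => simp [pvScanClause]
  | cons lit rest ih =>
    simp only [pvScanClause, List.any_cons, pvAbs]
    cases hg : a.get? (if lit < 0 then -lit else lit) with
    | none => simp [ih]
    | some b =>
      by_cases hb : (decide (lit > 0)) == b
      · have hbe : decide (lit > 0) = b := by simpa using hb
        simp [hbe]
      · have hbf : (decide (lit > 0) == b) = false := by simpa using hb
        have hne : ¬ (b = decide (0 < lit)) := by
          intro h; exact absurd (by simp [h]) hb
        simp [hbf, ih, hne]

-- and when it does not break, its unresolved list is B's filter
theorem scan_snd (a : PySem.Dict Int Bool) (c : List Int)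
    (h : (pvScanClause a c).1 = false) :
    (pvScanClause a c).2
      = c.filter (fun lit => !(a.contains (if lit < 0 then -lit else lit))) := by
  induction c with
  | nil => simp [pvScanClause]
  | cons lit rest ih =>
    simp only [pvScanClause] at h ⊢
    cases hg : a.get? (pvAbs lit) with
    | none =>
      simp only [hg] at h ⊢
      have hc : a.contains (if lit < 0 then -lit else lit) = false := by
        have := (PySem.Dict.get?_eq_none_iff_contains a (pvAbs lit)).mp hg
        simpa [pvAbs] using this
      simp [hc, ih h]
    | some b =>
      by_cases hb : (decide (lit > 0)) == b
      · simp [hg, hb] at h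
      · have hc : a.contains (if lit < 0 then -lit else lit) = true := by
          have h1 : a.get? (pvAbs lit) ≠ none := by simp [hg]
          have h2 := (PySem.Dict.get?_eq_none_iff_contains a (pvAbs lit)).not.mp h1
          simpa [pvAbs] using h2
        have hbf : (decide (lit > 0) == b) = false := by simpa using hb
        simp only [hg, hbf] at h ⊢
        simp only [Bool.false_eq_true, if_false] at h ⊢
        simp [hc, ih h]

-- Option-state fold absorbs none
theorem foldl_altStep_none (cs : List (List Int)) :
    List.foldl altStep none cs = none := by
  induction cs with
  | nil => rfl
  | cons c cs ih => simpa [List.foldl, altStep] using ih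

-- A's per-pass loop IS B's fold pass (any starting `changed` flag)
theorem pass_eq (cs : List (List Int)) : ∀ (a : PySem.Dict Int Bool) (changed : Bool),
    pvPass a changed cs = List.foldl altStep (some (changed, a)) cs := by
  induction cs with
  | nil => intro a changed; rfl
  | cons c cs ih =>
    intro a changed
    simp only [pvPass, List.foldl, altStep]
    by_cases hs : (pvScanClause a c).1
    · have : altClauseRem a c = none := by simp [altClauseRem, ← scan_fst, hs]
      simp [hs, this, ih]
    · have hs' : (pvScanClause a c).1 = false := by simpa using hs
      have hrem : altClauseRem a c
          = some (c.filter (fun lit => !(a.contains (if lit < 0 then -lit else lit)))) := by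
        simp [altClauseRem, ← scan_fst, hs']
      rw [scan_snd a c hs'] at *
      simp only [hs', if_false, Bool.false_eq_true]
      cases hf : c.filter (fun lit => !(a.contains (if lit < 0 then -lit else lit))) with
      | nil => simp [hf, hrem, foldl_altStep_none]
      | cons lit tl =>
        cases tl with
        | nil =>
          have hmem : lit ∈ c.filter (fun lit => !(a.contains (if lit < 0 then -lit else lit))) := by
            simp [hf]
          have hnc : a.contains (if lit < 0 then -lit else lit) = false := by
            have := List.of_mem_filter hmem
            simpa using this
          have hg : a.get? (if lit < 0 then -lit else lit) = none := by
            have := (PySem.Dict.get?_eq_none_iff_contains a (pvAbs lit)).mpr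
              (by simpa [pvAbs] using hnc)
            simpa [pvAbs] using this
          simp [hf, hrem, ih, pvAbs, hg]
        | cons l2 tl2 => simp [hf, hrem, ih]

-- the two fuel expressions agree
theorem fuel_eq (clauses : List (List Int)) : altFuel clauses = pvFuel clauses := by
  have h : ∀ (l : List (List Int)) (n : Nat),
      l.foldl (fun s c => s + c.length) n = n + (l.map List.length).sum := by
    intro l; induction l with
    | nil => intro n; simp
    | cons c cs ih => intro n; simp [List.foldl, ih, Nat.add_assoc]
  simp [altFuel, pvFuel, h]

-- the two fixed-point loops agree at every fuel
theorem propagate_eq (clauses : List (List Int)) :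
    ∀ (f : Nat) (a : PySem.Dict Int Bool),
      altPropagate clauses f a = pvPropagate clauses a f := by
  intro f
  induction f with
  | zero => intro a; rfl
  | succ f ih =>
    intro a
    simp only [altPropagate, pvPropagate, altPass, ← pass_eq]
    cases h : pvPass a false clauses with
    | none => rfl
    | some p =>
      obtain ⟨changed, a'⟩ := p
      cases changed <;> simp [ih]

-- A's range-scan for the first unassigned variable IS B's find? over the range
theorem find_eq : ∀ (a : PySem.Dict Int Bool) (v n : Int),
    pvFirstUnassigned a v n = (PySem.List.pyRange v (n + 1) 1).find? (fun u => !(a.contains u)) := by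
  intro a v n
  induction v using pvFirstUnassigned.induct a n with
  | case1 v h hc ih =>
    rw [pvFirstUnassigned, PySem.List.pyRange_one_cons h]
    simp [h, hc, List.find?, ih]
  | case2 v h hc =>
    rw [pvFirstUnassigned, PySem.List.pyRange_one_cons h]
    simp [h, hc, List.find?]
  | case3 v h =>
    rw [pvFirstUnassigned, PySem.List.pyRange_one_eq_nil (by omega)]
    simp [h]

-- B's stack loop computes the conjunction, over all frames, of A's recursion on that frame
theorem altLoop_eq_all (clauses : List (List Int)) (n_total : Int)
    (st : List (PySem.Dict Int Bool × Int)) :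
    altLoop clauses n_total st = st.all (fun f => pvGoA clauses n_total f.1 f.2) := by
  induction st using altLoop.induct clauses n_total with
  | case1 => simp [altLoop]
  | case2 cur depth rest hprop ih =>
    rw [altLoop]; simp only [List.all_cons]; rw [pvGoA]
    rw [← propagate_eq, ← fuel_eq]
    simp [hprop, ih]
  | case3 cur depth rest a hprop hle =>
    rw [altLoop]; simp only [List.all_cons]; rw [pvGoA]
    rw [← propagate_eq, ← fuel_eq]
    simp [hprop, hle]
  | case4 cur depth rest a hprop hle hfind =>
    rw [altLoop]; simp only [List.all_cons]; rw [pvGoA]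
    rw [← propagate_eq, ← fuel_eq]
    simp only [altFind] at hfind
    simp [altFind, find_eq, hprop, hle, hfind]
  | case5 cur depth rest a hprop hle v hfind ih =>
    rw [altLoop]; simp only [List.all_cons]; rw [pvGoA]
    rw [← propagate_eq, ← fuel_eq]
    simp only [altFind] at hfind
    simp [altFind, find_eq, hprop, hle, hfind, ih, Bool.and_assoc]

-- ===== VERDICT (by name: the statement is the Claim_ definition above) =====
theorem dpll_rec_py_spec : Claim_equal_dpll_rec_py := by
  intro clauses n_total assign depth_left _
  unfold Spec_dpll_rec_py dpll_rec_py dpll_rec_py_alt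
  rw [altLoop_eq_all]
  simp [List.all]
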